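-- pv_equiv track=rewrite | github.com/raunee/algorithm | Lv.2/day50_tired.py | solution
-- ===== SOURCE A (Python) =====
-- from itertools import permutations
--
-- def solution(k, dungeons):
--     answer = 0
--     for case in permutations(dungeons):
--         k_copy = k
--         cnt = 0
--         for i in range(len(case)):
--             if k_copy >= case[i][0]:
--                 k_copy -= case[i][1]
--                 cnt += 1
--                 if i == len(case) - 1:
--                     answer = max(answer, cnt)
--                     break
--             else:
--                 answer = max(answer, cnt)
--                 break
--     return answer
-- ===== SOURCE B (Python) =====
-- def solution(k, dungeons):
--     def best(fatigue, ds):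
--         options = []
--         for i, d in enumerate(ds):
--             req, cost = d[:2]
--             if fatigue >= req:
--                 options.append(1 + best(fatigue - cost, ds[:i] + ds[i + 1:]))
--             else:
--                 options.append(0)
--         return max(options, default=0)
--     return best(k, dungeons)
-- ===== Notes on version B (the rewrite author's own statement) =====
-- stated objective: alternative
-- what changed: Replaced A's exhaustive simulation of every itertools.permutations order by a recursive depth-first search that at each step tries each still-available dungeon whose requirement is met and recurses on the list with it removed, sharing common prefixes and pruning unplayable branches.
-- outside the precondition, e.g. on solution(0, [[5]]): A returns 0, B raises ValueError
import Mathlib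
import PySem

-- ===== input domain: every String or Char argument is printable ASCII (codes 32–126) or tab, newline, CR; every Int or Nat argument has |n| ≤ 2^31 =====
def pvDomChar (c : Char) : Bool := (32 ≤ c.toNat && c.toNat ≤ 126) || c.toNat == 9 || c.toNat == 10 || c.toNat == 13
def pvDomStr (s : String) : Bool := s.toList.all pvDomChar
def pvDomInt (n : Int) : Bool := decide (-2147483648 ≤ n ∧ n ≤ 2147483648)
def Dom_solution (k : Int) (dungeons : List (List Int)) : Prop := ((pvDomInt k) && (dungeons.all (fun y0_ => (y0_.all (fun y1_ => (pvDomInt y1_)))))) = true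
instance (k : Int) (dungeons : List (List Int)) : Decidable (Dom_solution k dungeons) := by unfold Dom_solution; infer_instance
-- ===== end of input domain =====

-- B replaces A's full enumeration of dungeon orderings (itertools.permutations) by a
-- pruned depth-first search over "pick one playable dungeon, recurse on the rest";
-- objective: alternative algorithm (not measurably faster).


-- ===== PORT A =====
-- picksA l enumerates, in index order, the pairs (l[i], l with index i removed):
-- Python's "ds[i], ds[:i] + ds[i+1:]" enumeration (shared helper of both ports).
def picksA {α : Type} : List α → List (α × List α)
  | [] => []
  | x :: xs => (x, xs) :: (picksA xs).map (fun p => (p.1, x :: p.2))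

-- termination lemma for the two recursions below (cited by decreasing_by)
theorem picksA_snd_length {α : Type} : ∀ (l : List α) (p : α × List α),
    p ∈ picksA l → p.2.length + 1 = l.length := by
  intro l
  induction l with
  | nil => intro p h; simp [picksA] at h
  | cons x xs ih =>
    intro p h
    simp only [picksA, List.mem_cons, List.mem_map] at h
    rcases h with h | ⟨q, hq, rfl⟩
    · simp [h]
    · have := ih q hq
      simp only [List.length_cons]
      omega

-- port of itertools.permutations (lexicographic-by-index order)
def permsPy {α : Type} : List α → List (List α)
  | [] => [[]]
  | x :: xs =>
      ((picksA (x :: xs)).attach.map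
        (fun p => (permsPy p.1.2).map (fun q => p.1.1 :: q))).flatten
termination_by l => l.length
decreasing_by
  have := picksA_snd_length (x :: xs) p.1 p.2
  simp at this ⊢
  omega

-- A's inner loop: walk the ordered dungeons, counting while the requirement is met
def simA (k cnt : Int) : List (List Int) → Int
  | [] => cnt
  | d :: rest => if d.getD 0 0 ≤ k then simA (k - d.getD 1 0) (cnt + 1) rest else cnt

def solution (k : Int) (dungeons : List (List Int)) : Int :=
  (permsPy dungeons).foldl (fun answer case_ => max answer (simA k 0 case_)) 0

-- ===== PORT B =====
-- B's recursion: for each position i, option = 1 + best on the list with i removed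
-- if dungeons[i] is playable, else 0; answer = max of the options (0 if none).
def bestB (fatigue : Int) (ds : List (List Int)) : Int :=
  ((picksA ds).attach.map
    (fun p =>
      if p.1.1.getD 0 0 ≤ fatigue then 1 + bestB (fatigue - p.1.1.getD 1 0) p.1.2
      else 0)).foldl max 0
termination_by ds.length
decreasing_by
  have := picksA_snd_length ds p.1 p.2
  omega

def solution_alt (k : Int) (dungeons : List (List Int)) : Int :=
  bestB k dungeons

-- ===== PRECONDITION & SPEC =====
-- Pre_ requires every dungeon to carry both a requirement and a cost. This excludes
-- some inputs on which A returns (a one-entry dungeon whose requirement exceeds every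
-- reachable fatigue, so A never reads the missing cost and returns, e.g. 0 on
-- (0, [[5]])), while B unpacks [req, cost] from every dungeon and raises ValueError.
def Pre_solution (k : Int) (dungeons : List (List Int)) : Prop :=
  ∀ d ∈ dungeons, 2 ≤ d.length
instance (k : Int) (dungeons : List (List Int)) : Decidable (Pre_solution k dungeons) := by
  unfold Pre_solution; infer_instance

def pvWitness_solution : Int × List (List Int) := (4, [[2, 1], [3, 2]])

def Spec_solution (k : Int) (dungeons : List (List Int)) (out : Int) : Prop := out = solution_alt k dungeons
instance (k : Int) (dungeons : List (List Int)) (out : Int) : Decidable (Spec_solution k dungeons out) := by unfold Spec_solution; infer_instance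

-- ===== CLAIM (what is proved, stated in full; the proofs are below) =====
def Claim_equal_solution : Prop := ∀ (k : Int) (dungeons : List (List Int)), Dom_solution k dungeons → Pre_solution k dungeons → Spec_solution k dungeons (solution k dungeons)

-- ===== LEMMAS AND PROOFS =====

theorem foldl_max_max (xs : List Int) : ∀ a b : Int,
    xs.foldl max (max a b) = max b (xs.foldl max a) := by
  induction xs with
  | nil => intro a b; exact max_comm a b
  | cons x xs ih =>
    intro a b
    simp only [List.foldl_cons]
    rw [show max (max a b) x = max (max a x) b by omega, ih (max a x) b]

theorem le_foldl_max (xs : List Int) : ∀ a : Int, a ≤ xs.foldl max a := by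
  induction xs with
  | nil => intro a; simp
  | cons x xs ih =>
    intro a
    simp only [List.foldl_cons]
    have := ih (max a x)
    omega

theorem foldl_max_nonneg (xs : List Int) : 0 ≤ xs.foldl max 0 := le_foldl_max xs 0

theorem foldl_max_append (xs ys : List Int) :
    (xs ++ ys).foldl max 0 = max (xs.foldl max 0) (ys.foldl max 0) := by
  rw [List.foldl_append]
  have h3 : ys.foldl max (xs.foldl max 0) = ys.foldl max (max 0 (xs.foldl max 0)) := by
    congr 1
    have := foldl_max_nonneg xs
    omega
  rw [h3, foldl_max_max ys 0 (xs.foldl max 0)]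

theorem foldl_max_flatten (L : List (List Int)) :
    L.flatten.foldl max 0 = (L.map (fun xs => xs.foldl max 0)).foldl max 0 := by
  induction L with
  | nil => simp
  | cons xs L ih =>
    simp only [List.flatten_cons, List.map_cons, List.foldl_cons]
    rw [foldl_max_append, ih, foldl_max_max (L.map (fun xs => xs.foldl max 0)) 0 (xs.foldl max 0)]

theorem foldl_max_map_add_one (f : List (List Int) → Int) (P : List (List (List Int)))
    (hne : P ≠ []) (hnn : ∀ q ∈ P, 0 ≤ f q) :
    (P.map (fun q => 1 + f q)).foldl max 0 = 1 + (P.map f).foldl max 0 := by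
  induction P with
  | nil => exact absurd rfl hne
  | cons q P ih =>
    simp only [List.map_cons, List.foldl_cons]
    have h0 : 0 ≤ f q := hnn q (by simp)
    by_cases hP : P = []
    · subst hP
      simp
      omega
    · have hnn' : ∀ r ∈ P, 0 ≤ f r := fun r hr => hnn r (by simp [hr])
      rw [foldl_max_max (P.map (fun q => 1 + f q)) 0 (1 + f q),
          foldl_max_max (P.map f) 0 (f q), ih hP hnn']
      have := foldl_max_nonneg (P.map f)
      omega

theorem foldl_max_zeros (P : List (List (List Int))) :
    (P.map (fun _ => (0 : Int))).foldl max 0 = 0 := by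
  induction P with
  | nil => simp
  | cons q P ih => simpa using ih

theorem simA_shift (l : List (List Int)) : ∀ k cnt, simA k cnt l = cnt + simA k 0 l := by
  induction l with
  | nil => intro k cnt; simp [simA]
  | cons d rest ih =>
    intro k cnt
    simp only [simA]
    split_ifs
    · rw [ih _ (cnt + 1), ih _ (0 + 1)]; omega
    · omega

theorem simA_nonneg (l : List (List Int)) : ∀ k, 0 ≤ simA k 0 l := by
  induction l with
  | nil => intro k; simp [simA]
  | cons d rest ih =>
    intro k
    simp only [simA]
    split_ifs
    · rw [simA_shift]; have := ih (k - d.getD 1 0); omega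
    · omega

theorem permsPy_ne_nil {α : Type} : ∀ (l : List α), permsPy l ≠ [] := by
  intro l
  induction l with
  | nil => simp [permsPy]
  | cons x xs ih =>
    rw [permsPy]
    intro h
    rcases List.exists_mem_of_ne_nil (permsPy xs) ih with ⟨q, hq⟩
    have hmem : ((x, xs) : α × List α) ∈ picksA (x :: xs) := by
      simp [picksA]
    have hin : (x :: q) ∈
        ((picksA (x :: xs)).attach.map
          (fun p => (permsPy p.1.2).map (fun r => p.1.1 :: r))).flatten := by
      refine List.mem_flatten.mpr ⟨(permsPy xs).map (fun r => x :: r), ?_, ?_⟩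
      · exact List.mem_map.mpr ⟨⟨(x, xs), hmem⟩, List.mem_attach _ _, rfl⟩
      · exact List.mem_map.mpr ⟨q, hq, rfl⟩
    rw [h] at hin
    exact absurd hin (List.not_mem_nil)

theorem permsPy_nil_eq : permsPy ([] : List (List Int)) = [[]] := by rw [permsPy]

theorem bestB_nil_eq (k : Int) : bestB k [] = 0 := by rw [bestB]; simp [picksA]

theorem main_eq : ∀ (n : Nat) (ds : List (List Int)), ds.length ≤ n → ∀ k : Int,
    (permsPy ds).foldl (fun answer case_ => max answer (simA k 0 case_)) 0 = bestB k ds := by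
  intro n
  induction n with
  | zero =>
    intro ds hds k
    have : ds = [] := List.length_eq_zero_iff.mp (Nat.le_zero.mp hds)
    subst this
    rw [permsPy_nil_eq, bestB_nil_eq]
    simp [simA]
  | succ n ih =>
    intro ds hds k
    cases ds with
    | nil =>
      rw [permsPy_nil_eq, bestB_nil_eq]
      simp [simA]
    | cons x xs =>
      rw [← List.foldl_map (f := simA k 0) (g := max)]
      rw [permsPy, bestB]
      rw [List.map_flatten, foldl_max_flatten, List.map_map, List.map_map]
      congr 1
      refine List.map_congr_left ?_
      rintro ⟨p, hp⟩ _
      have hlen : p.2.length + 1 = xs.length + 1 := picksA_snd_length (x :: xs) p hp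
      have hle : p.2.length ≤ n := by
        have := Nat.le_of_succ_le_succ hds
        omega
      simp only [Function.comp]
      rw [List.map_map]
      have hsim : ∀ q : List (List Int),
          (simA k 0 ∘ fun r => p.1 :: r) q
            = if p.1.getD 0 0 ≤ k then 1 + simA (k - p.1.getD 1 0) 0 q else 0 := by
        intro q
        simp only [Function.comp, simA]
        split_ifs
        · rw [simA_shift]; omega
        · rfl
      rw [List.map_congr_left (fun q _ => hsim q)]
      by_cases hplay : p.1.getD 0 0 ≤ k
      · simp only [hplay, if_true]
        have hrw : (fun q => (1 : Int) + simA (k - p.1.getD 1 0) 0 q)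
            = fun q => 1 + (fun r => simA (k - p.1.getD 1 0) 0 r) q := rfl
        rw [hrw, foldl_max_map_add_one _ _ (permsPy_ne_nil p.2)
              (fun q _ => simA_nonneg q (k - p.1.getD 1 0))]
        rw [List.foldl_map (f := simA (k - p.1.getD 1 0) 0) (g := max)]
        rw [ih p.2 hle (k - p.1.getD 1 0)]
      · simp only [hplay, if_false]
        exact foldl_max_zeros (permsPy p.2)

-- ===== VERDICT (by name: the statement is the Claim_ definition above) =====
theorem solution_spec : Claim_equal_solution := by
  intro k dungeons _ _
  unfold Spec_solution solution solution_alt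
  exact main_eq dungeons.length dungeons (le_refl _) k
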